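-- pv_equiv track=rewrite | github.com/tongjingqi/Game-RL | lifegame/generate_dataset.py | _identify_changing_cells
-- ===== SOURCE A (Python) =====
-- from typing import List, Dict, Tuple, Any , Optional
--
-- def count_neighbors(grid: List[List[int]], x: int, y: int) -> int:
--     """Count live neighbors for a cell, including wrapping around edges."""
--     count = 0
--     size = len(grid)
--     for dx in [-1, 0, 1]:
--         for dy in [-1, 0, 1]:
--             if dx == 0 and dy == 0:
--                 continue
--             nx = (x + dx) % size
--             ny = (y + dy) % size
--             count += grid[nx][ny]
--     return count
--
-- def _identify_changing_cells(grid: List[List[int]]) -> List[Tuple[int, int]]: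
--     """识别将要在下一步改变状态的细胞"""
--     grid_size = len(grid)
--     changing_cells = []
--
--     for r in range(grid_size):
--         for c in range(grid_size):
--             neighbors = count_neighbors(grid, r, c)
--             if grid[r][c] == 1:  # 活细胞
--                 if neighbors < 2 or neighbors > 3:
--                     changing_cells.append((r, c))
--             else:  # 死细胞
--                 if neighbors == 3:
--                     changing_cells.append((r, c))
--
--     return changing_cells
-- ===== SOURCE B (Python) =====
-- from typing import List, Tuple
--
-- _OFFSETS = [(-1, -1), (-1, 0), (-1, 1), (0, -1), (0, 1), (1, -1), (1, 0), (1, 1)]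
--
-- def _identify_changing_cells(grid: List[List[int]]) -> List[Tuple[int, int]]:
--     """Scatter pass: each non-zero cell adds its value to its 8 wrapped
--     neighbours in a dict; then one gather-free pass applies the rule."""
--     n = len(grid)
--     counts = {}
--     for r in range(n):
--         row = grid[r]
--         for c in range(n):
--             v = row[c]
--             if v:
--                 for dr, dc in _OFFSETS:
--                     key = ((r + dr) % n, (c + dc) % n)
--                     counts[key] = counts.get(key, 0) + v
--     result = []
--     for r in range(n):
--         for c in range(n):
--             nb = counts.get((r, c), 0)
--             if grid[r][c] == 1:
--                 if nb < 2 or nb > 3: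
--                     result.append((r, c))
--             elif nb == 3:
--                 result.append((r, c))
--     return result
-- ===== Notes on version B (the rewrite author's own statement) =====
-- stated objective: alternative
-- what changed: Replaces the per-cell 3x3 gather (count_neighbors called for every cell) with a single scatter pass that adds each non-zero cell's value to its 8 wrapped neighbours in a dict of counts, followed by one rule-applying pass reading the dict.
import Mathlib
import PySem

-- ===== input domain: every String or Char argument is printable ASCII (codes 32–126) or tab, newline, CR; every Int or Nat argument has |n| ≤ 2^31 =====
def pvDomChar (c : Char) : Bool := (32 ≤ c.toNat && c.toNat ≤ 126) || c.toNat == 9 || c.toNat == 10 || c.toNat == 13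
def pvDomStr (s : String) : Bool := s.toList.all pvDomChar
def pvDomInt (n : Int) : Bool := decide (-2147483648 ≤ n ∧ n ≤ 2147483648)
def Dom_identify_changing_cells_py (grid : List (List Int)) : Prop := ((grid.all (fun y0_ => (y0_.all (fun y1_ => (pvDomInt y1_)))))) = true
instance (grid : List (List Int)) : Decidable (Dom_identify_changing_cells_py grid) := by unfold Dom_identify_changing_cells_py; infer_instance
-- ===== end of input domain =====

-- B replaces the per-cell 3x3 neighbour gather with one scatter pass into a dict of
-- counts followed by one rule-applying pass (alternative decomposition, same cost).

-- ===== PORT A =====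
def count_neighbors_py (grid : List (List Int)) (x y : Int) : Int :=
  let size : Int := grid.length
  [(-1 : Int), 0, 1].foldl (fun count dx =>
    [(-1 : Int), 0, 1].foldl (fun count dy =>
      if dx = 0 ∧ dy = 0 then count
      else
        count + PySem.List.pyGetD (PySem.List.pyGetD grid (PySem.Int.mod (x + dx) size) [])
                  (PySem.Int.mod (y + dy) size) 0) count) 0

def identify_changing_cells_py (grid : List (List Int)) : List (Int × Int) :=
  let grid_size : Int := grid.length
  (PySem.List.pyRange 0 grid_size 1).foldl (fun acc r =>
    (PySem.List.pyRange 0 grid_size 1).foldl (fun acc c =>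
      let neighbors := count_neighbors_py grid r c
      if PySem.List.pyGetD (PySem.List.pyGetD grid r []) c 0 = 1 then
        if neighbors < 2 ∨ neighbors > 3 then acc ++ [(r, c)] else acc
      else
        if neighbors = 3 then acc ++ [(r, c)] else acc) acc) []

-- ===== PORT B =====
def pvOffsets : List (Int × Int) :=
  [(-1, -1), (-1, 0), (-1, 1), (0, -1), (0, 1), (1, -1), (1, 0), (1, 1)]

-- the scatter loop of Source B: every non-zero cell adds its value to its 8 wrapped neighbours
def pvScatter (grid : List (List Int)) : PySem.Dict (Int × Int) Int :=
  let n : Int := grid.length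
  (PySem.List.pyRange 0 n 1).foldl (fun d r =>
    let row := PySem.List.pyGetD grid r []
    (PySem.List.pyRange 0 n 1).foldl (fun d c =>
      let v := PySem.List.pyGetD row c 0
      if v ≠ 0 then
        pvOffsets.foldl (fun d o =>
          d.modify (PySem.Int.mod (r + o.1) n, PySem.Int.mod (c + o.2) n) 0 (· + v)) d
      else d) d) PySem.Dict.empty

def identify_changing_cells_py_alt (grid : List (List Int)) : List (Int × Int) :=
  let n : Int := grid.length
  let counts := pvScatter grid
  (PySem.List.pyRange 0 n 1).foldl (fun acc r =>
    (PySem.List.pyRange 0 n 1).foldl (fun acc c =>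
      let nb := counts.getD (r, c) 0
      if PySem.List.pyGetD (PySem.List.pyGetD grid r []) c 0 = 1 then
        if nb < 2 ∨ nb > 3 then acc ++ [(r, c)] else acc
      else
        if nb = 3 then acc ++ [(r, c)] else acc) acc) []

-- ===== PRECONDITION & SPEC =====
-- Pre_ excludes exactly the ragged grids having a row shorter than len(grid), on which
-- A raises IndexError (grid[nx][ny] in count_neighbors).
def Pre_identify_changing_cells_py (grid : List (List Int)) : Prop :=
  ∀ row ∈ grid, grid.length ≤ row.length
instance (grid : List (List Int)) : Decidable (Pre_identify_changing_cells_py grid) := by unfold Pre_identify_changing_cells_py; infer_instance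

def pvWitness_identify_changing_cells_py : List (List Int) := [[1, 1], [0, 1]]

def Spec_identify_changing_cells_py (grid : List (List Int)) (out : List (Int × Int)) : Prop := out = identify_changing_cells_py_alt grid
instance (grid : List (List Int)) (out : List (Int × Int)) : Decidable (Spec_identify_changing_cells_py grid out) := by unfold Spec_identify_changing_cells_py; infer_instance

-- ===== CLAIM (what is proved, stated in full; the proofs are below) =====
def Claim_equal_identify_changing_cells_py : Prop := ∀ (grid : List (List Int)), Dom_identify_changing_cells_py grid → Pre_identify_changing_cells_py grid → Spec_identify_changing_cells_py grid (identify_changing_cells_py grid)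

-- ===== LEMMAS AND PROOFS =====

-- the cell value grid[r][c] both ports read (total form used under Pre_)
def pvG (grid : List (List Int)) (r c : Int) : Int :=
  PySem.List.pyGetD (PySem.List.pyGetD grid r []) c 0

-- contribution of cell (r,c) to the count at position p
def pvContrib (grid : List (List Int)) (n r c : Int) (p : Int × Int) : Int :=
  (pvOffsets.map (fun o =>
    if (PySem.Int.mod (r + o.1) n, PySem.Int.mod (c + o.2) n) = p then pvG grid r c else 0)).sum

theorem pvG_def (grid : List (List Int)) (r c : Int) :
    PySem.List.pyGetD (PySem.List.pyGetD grid r []) c 0 = pvG grid r c := rfl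

-- a fold whose every step adds f x to the value at p adds the total sum
theorem pv_getD_foldl_add {α : Type} (p : Int × Int) (f : α → Int)
    (step : PySem.Dict (Int × Int) Int → α → PySem.Dict (Int × Int) Int)
    (h : ∀ d x, (step d x).getD p 0 = d.getD p 0 + f x) :
    ∀ (l : List α) (d : PySem.Dict (Int × Int) Int),
      (l.foldl step d).getD p 0 = d.getD p 0 + (l.map f).sum := by
  intro l
  induction l with
  | nil => simp
  | cons x xs ih => intro d; simp [List.foldl, ih, h, add_assoc]

-- one modify step
theorem pv_getD_modify_add (d : PySem.Dict (Int × Int) Int) (k p : Int × Int) (v : Int) :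
    (d.modify k 0 (· + v)).getD p 0 = d.getD p 0 + (if k = p then v else 0) := by
  rw [PySem.Dict.getD_modify]
  split_ifs with h1 h2 h2
  · rw [h1]
  · exact absurd h1.symm h2
  · exact absurd h2.symm h1
  · ring

-- the 8-offset scatter of one cell, guard included
theorem pv_scatter_cell (grid : List (List Int)) (n r c : Int) (p : Int × Int)
    (d : PySem.Dict (Int × Int) Int) :
    ((if pvG grid r c ≠ 0 then
        pvOffsets.foldl (fun d o =>
          d.modify (PySem.Int.mod (r + o.1) n, PySem.Int.mod (c + o.2) n) 0 (· + pvG grid r c)) d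
      else d) : PySem.Dict (Int × Int) Int).getD p 0
      = d.getD p 0 + pvContrib grid n r c p := by
  by_cases hv : pvG grid r c = 0
  · simp [hv, pvContrib]
  · rw [if_pos hv]
    rw [pv_getD_foldl_add p
      (fun o => if (PySem.Int.mod (r + o.1) n, PySem.Int.mod (c + o.2) n) = p then pvG grid r c else 0)
      _ (fun d o => by rw [pv_getD_modify_add])]
    rfl

-- getD of the full scatter dict is the double sum of contributions
theorem pv_scatter_getD (grid : List (List Int)) (p : Int × Int) :
    (pvScatter grid).getD p 0
      = ((PySem.List.pyRange 0 (grid.length : Int) 1).map (fun r =>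
          ((PySem.List.pyRange 0 (grid.length : Int) 1).map (fun c =>
            pvContrib grid (grid.length : Int) r c p)).sum)).sum := by
  unfold pvScatter
  dsimp only
  simp only [pvG_def]
  rw [pv_getD_foldl_add p
      (fun r => ((PySem.List.pyRange 0 (grid.length : Int) 1).map (fun c =>
        pvContrib grid (grid.length : Int) r c p)).sum)
      _
      (fun d r => pv_getD_foldl_add p (fun c => pvContrib grid (grid.length : Int) r c p) _
        (fun d c => pv_scatter_cell grid (grid.length : Int) r c p d) _ d)]
  simp

-- mod bijection: for x in [0,N), (x+e) % N = X ↔ x = (X-e) % N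
theorem pv_mod_shift (N : Nat) (x X e : Int) (hx0 : 0 ≤ x) (hx : x < (N : Int))
    (hX0 : 0 ≤ X) (hX : X < (N : Int)) :
    ((x + e) % (N : Int) = X) ↔ (x = (X - e) % (N : Int)) := by
  constructor
  · intro h
    rw [← h, Int.sub_emod, Int.emod_emod_of_dvd _ dvd_rfl, ← Int.sub_emod,
      add_sub_cancel_right, Int.emod_eq_of_lt hx0 hx]
  · intro h
    rw [h, Int.add_emod, Int.emod_emod_of_dvd _ dvd_rfl, ← Int.add_emod,
      sub_add_cancel, Int.emod_eq_of_lt hX0 hX]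

-- double sum with a unique surviving cell
theorem pv_pick (g : Int → Int → Int) (N R C : Nat) (dr dc : Int) (hR : R < N) (hC : C < N) :
    (∑ r ∈ Finset.range N, ∑ c ∈ Finset.range N,
      if (((r : Int) + dr) % (N : Int), ((c : Int) + dc) % (N : Int)) = ((R : Int), (C : Int))
      then g r c else 0)
    = g (((R : Int) - dr) % (N : Int)) (((C : Int) - dc) % (N : Int)) := by
  have hNi : (0 : Int) < (N : Int) := by exact_mod_cast (show 0 < N by omega)
  have ha0 : 0 ≤ ((R : Int) - dr) % (N : Int) := Int.emod_nonneg _ (by omega)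
  have haN : ((R : Int) - dr) % (N : Int) < (N : Int) := Int.emod_lt_of_pos _ hNi
  have hb0 : 0 ≤ ((C : Int) - dc) % (N : Int) := Int.emod_nonneg _ (by omega)
  have hbN : ((C : Int) - dc) % (N : Int) < (N : Int) := Int.emod_lt_of_pos _ hNi
  have hA : ((((R : Int) - dr) % (N : Int)).toNat : Int) = ((R : Int) - dr) % (N : Int) :=
    Int.toNat_of_nonneg ha0
  have hB : ((((C : Int) - dc) % (N : Int)).toNat : Int) = ((C : Int) - dc) % (N : Int) :=
    Int.toNat_of_nonneg hb0
  have hR0 : (0 : Int) ≤ (R : Int) := by positivity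
  have hRN : ((R : Int)) < (N : Int) := by exact_mod_cast hR
  have hC0 : (0 : Int) ≤ (C : Int) := by positivity
  have hCN : ((C : Int)) < (N : Int) := by exact_mod_cast hC
  rw [Finset.sum_eq_single_of_mem ((((R : Int) - dr) % (N : Int)).toNat)
      (Finset.mem_range.mpr (by omega))]
  · rw [Finset.sum_eq_single_of_mem ((((C : Int) - dc) % (N : Int)).toNat)
        (Finset.mem_range.mpr (by omega))]
    · rw [hA, hB, if_pos]
      refine Prod.ext ?_ ?_
      · exact (pv_mod_shift N _ (R : Int) dr ha0 haN hR0 hRN).mpr rfl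
      · exact (pv_mod_shift N _ (C : Int) dc hb0 hbN hC0 hCN).mpr rfl
    · intro c' hc' hne
      rw [if_neg]
      intro heq
      rw [Prod.mk.injEq] at heq
      apply hne
      have := (pv_mod_shift N (c' : Int) (C : Int) dc (by positivity)
        (by exact_mod_cast Finset.mem_range.mp hc') hC0 hCN).mp heq.2
      omega
  · intro r' hr' hne
    apply Finset.sum_eq_zero
    intro c' _
    rw [if_neg]
    intro heq
    rw [Prod.mk.injEq] at heq
    apply hne
    have := (pv_mod_shift N (r' : Int) (R : Int) dr (by positivity)
      (by exact_mod_cast Finset.mem_range.mp hr') hR0 hRN).mp heq.1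
    omega

theorem pv_pyRange_nat (m : Nat) :
    PySem.List.pyRange 0 (m : Int) 1 = (List.range m).map (fun k : Nat => (k : Int)) := by
  simp only [PySem.List.pyRange_one, zero_add, sub_zero, Int.toNat_natCast]

theorem pv_sum_pyRange (m : Nat) (f : Int → Int) :
    ((PySem.List.pyRange 0 (m : Int) 1).map f).sum = ∑ i ∈ Finset.range m, f (i : Int) := by
  rw [pv_pyRange_nat, List.map_map]
  rfl

-- the counts dict agrees with A's per-cell gather at every in-range position
theorem pv_counts_eq (grid : List (List Int)) (R C : Nat)
    (hR : R < grid.length) (hC : C < grid.length) :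
    (pvScatter grid).getD ((R : Int), (C : Int)) 0 = count_neighbors_py grid R C := by
  have hNi : (0 : Int) < (grid.length : Int) := by exact_mod_cast (show 0 < grid.length by omega)
  rw [pv_scatter_getD]
  simp only [pv_sum_pyRange]
  simp only [pvContrib, pvOffsets, List.map_cons, List.map_nil, List.sum_cons, List.sum_nil,
    add_zero]
  simp only [PySem.Int.mod_eq_emod_of_pos hNi]
  simp only [Finset.sum_add_distrib]
  have hq : ∀ dr dc : Int,
      (∑ r ∈ Finset.range grid.length, ∑ c ∈ Finset.range grid.length,
        if (((r : Int) + dr) % (grid.length : Int), ((c : Int) + dc) % (grid.length : Int))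
            = ((R : Int), (C : Int)) then pvG grid r c else 0)
      = pvG grid (((R : Int) - dr) % (grid.length : Int)) (((C : Int) - dc) % (grid.length : Int)) :=
    fun dr dc => pv_pick (pvG grid) grid.length R C dr dc hR hC
  have h2 := hq (-1) 0
  have h4 := hq 0 (-1)
  have h5 := hq 0 1
  have h7 := hq 1 0
  simp only [add_zero, sub_zero] at h2 h4 h5 h7
  rw [hq (-1) (-1), h2, hq (-1) 1, h4, h5, hq 1 (-1), h7, hq 1 1]
  simp only [count_neighbors_py, List.foldl, pvG_def]
  norm_num
  simp only [PySem.Int.mod_eq_emod_of_pos hNi]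
  simp only [sub_eq_add_neg]
  ring

-- ===== VERDICT (by name: the statement is the Claim_ definition above) =====
theorem identify_changing_cells_py_spec : Claim_equal_identify_changing_cells_py := by
  intro grid _ _
  unfold Spec_identify_changing_cells_py
  unfold identify_changing_cells_py identify_changing_cells_py_alt
  dsimp only
  apply PySem.List.foldl_congr_mem'
  intro r hr acc
  apply PySem.List.foldl_congr_mem'
  intro c hc acc'
  obtain ⟨hr0, hrn⟩ := (PySem.List.mem_pyRange_one).mp hr
  obtain ⟨hc0, hcn⟩ := (PySem.List.mem_pyRange_one).mp hc
  have hrr : r = ((r.toNat : Nat) : Int) := (Int.toNat_of_nonneg hr0).symm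
  have hcc : c = ((c.toNat : Nat) : Int) := (Int.toNat_of_nonneg hc0).symm
  rw [hrr, hcc, pv_counts_eq grid r.toNat c.toNat (by omega) (by omega)]
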